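-- pv_equiv track=rewrite | github.com/JohnEstebanAP/FundamentosProgramacionPython | Reto 5/reto5.py | pacientesPorSede
-- ===== SOURCE A (Python) =====
-- def sedeMayor(vectorResultado):
--     mayor = 0
--     for i in range(len(vectorResultado[0])):
--         if vectorResultado[0][i] > mayor:
--             mayor = vectorResultado[0][i]
--     return mayor
--
-- def pacientesPorSede(vectorResultado):
--     vectorPacientesPorSede = []
--     vectorIndice = []
--     vectorCantidad = []
--     sedemayor = sedeMayor(vectorResultado)
--     indice = 0
--     for i in range(sedemayor+1):
--         cantidad = 0
--         bandera = False
--         for j in range (len(vectorResultado[0])):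
--             if i == vectorResultado[0][j]:
--                 indice = i
--                 cantidad += 1
--                 bandera = True
--         if bandera:
--             vectorIndice.append(indice)
--             vectorCantidad.append(cantidad)
--
--     vectorPacientesPorSede.append(vectorIndice)
--     vectorPacientesPorSede.append(vectorCantidad)
--     return vectorPacientesPorSede
-- ===== SOURCE B (Python) =====
-- def pacientesPorSede(vectorResultado):
--     # Sort a copy of the non-negative sede ids, then one grouped pass over runs.
--     xs = sorted(x for x in vectorResultado[0] if x >= 0)
--     vectorIndice = []
--     vectorCantidad = []
--     i, n = 0, len(xs)
--     while i < n:
--         j = i + 1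
--         while j < n and xs[j] == xs[i]:
--             j += 1
--         vectorIndice.append(xs[i])
--         vectorCantidad.append(j - i)
--         i = j
--     return [vectorIndice, vectorCantidad]
-- ===== Notes on version B (the rewrite author's own statement) =====
-- stated objective: faster
-- what changed: Replaces A's scan of every value 0..max(row) with an inner pass per value by sorting a copy of the non-negative entries of vectorResultado[0] and emitting (value, run length) in one grouped linear pass.
-- outside the precondition, e.g. on pacientesPorSede([]): A raises IndexError, B raises IndexError
import Mathlib
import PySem

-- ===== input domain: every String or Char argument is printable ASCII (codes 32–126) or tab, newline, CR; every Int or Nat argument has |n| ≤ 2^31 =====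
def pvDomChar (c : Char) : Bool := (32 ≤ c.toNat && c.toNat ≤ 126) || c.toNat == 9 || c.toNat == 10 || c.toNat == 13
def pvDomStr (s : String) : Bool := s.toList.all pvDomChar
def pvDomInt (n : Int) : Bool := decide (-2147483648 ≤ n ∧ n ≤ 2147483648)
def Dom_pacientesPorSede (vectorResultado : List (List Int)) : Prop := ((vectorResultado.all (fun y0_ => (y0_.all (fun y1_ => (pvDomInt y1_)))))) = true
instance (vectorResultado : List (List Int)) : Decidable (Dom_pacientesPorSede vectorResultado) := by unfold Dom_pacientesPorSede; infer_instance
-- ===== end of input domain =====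

-- B sorts a copy of the non-negative entries of row 0 and counts runs in one pass
-- instead of A's per-value scan over 0..max (faster in a timing run's measurement).

-- ===== PORT A =====
-- helper sedeMayor(vectorResultado): running maximum starting at 0 over row 0
def sedeMayorPy (vectorResultado : List (List Int)) : Int :=
  (vectorResultado.headD []).foldl (fun mayor x => if x > mayor then x else mayor) 0

-- loop body of A's outer for-loop (the inner j-loop is the foldl over row)
def stepA (row : List Int) (st : List Int × List Int × Int) (i : Int) : List Int × List Int × Int :=
  let inner := row.foldl
    (fun (t : Int × Int × Bool) x => if i == x then (i, t.2.1 + 1, true) else t)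
    (st.2.2, 0, false)
  if inner.2.2 then (st.1 ++ [inner.1], st.2.1 ++ [inner.2.1], inner.1)
  else (st.1, st.2.1, inner.1)

def pacientesPorSede (vectorResultado : List (List Int)) : List (List Int) :=
  let row := vectorResultado.headD []
  let sedemayor := sedeMayorPy vectorResultado
  let st := (PySem.List.pyRange 0 (sedemayor + 1) 1).foldl (stepA row) ([], [], 0)
  [st.1, st.2.1]

-- ===== PORT B =====
-- the outer while-loop of Source B: consume one run of equal values, append (value, run length)
def groupLoop (xs vI vC : List Int) : List Int × List Int :=
  match xs with
  | [] => (vI, vC)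
  | x :: rest =>
    let same := rest.takeWhile (fun y => y == x)
    let restA := rest.dropWhile (fun y => y == x)
    groupLoop restA (vI ++ [x]) (vC ++ [1 + (same.length : Int)])
termination_by xs.length
decreasing_by
  simp only [List.length_cons]
  exact Nat.lt_succ_of_le (List.length_dropWhile_le _ _)

def pacientesPorSede_alt (vectorResultado : List (List Int)) : List (List Int) :=
  let xs := PySem.List.sorted ((vectorResultado.headD []).filter (fun x => decide (0 ≤ x))) (fun x => x) false
  let st := groupLoop xs [] []
  [st.1, st.2]

-- ===== PRECONDITION & SPEC =====
-- Pre_ excludes only vectorResultado = [], on which both Pythons raise IndexError at vectorResultado[0].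
def Pre_pacientesPorSede (vectorResultado : List (List Int)) : Prop := vectorResultado ≠ []
instance (vectorResultado : List (List Int)) : Decidable (Pre_pacientesPorSede vectorResultado) := by unfold Pre_pacientesPorSede; infer_instance
def pvWitness_pacientesPorSede : List (List Int) := [[2, 0, 2, -1, 5]]

def Spec_pacientesPorSede (vectorResultado : List (List Int)) (out : List (List Int)) : Prop := out = pacientesPorSede_alt vectorResultado
instance (vectorResultado : List (List Int)) (out : List (List Int)) : Decidable (Spec_pacientesPorSede vectorResultado out) := by unfold Spec_pacientesPorSede; infer_instance

-- ===== CLAIM (what is proved, stated in full; the proofs are below) =====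
def Claim_equal_pacientesPorSede : Prop := ∀ (vectorResultado : List (List Int)), Dom_pacientesPorSede vectorResultado → Pre_pacientesPorSede vectorResultado → Spec_pacientesPorSede vectorResultado (pacientesPorSede vectorResultado)

-- ===== LEMMAS AND PROOFS =====

-- A's inner loop computes (locale of the index, count, found-flag)
lemma innerA (row : List Int) (i ind0 : Int) (c0 : Int) (b0 : Bool) :
    row.foldl (fun (t : Int × Int × Bool) x => if i == x then (i, t.2.1 + 1, true) else t)
      (ind0, c0, b0)
    = (if row.contains i then i else ind0, c0 + (row.count i : Int), b0 || row.contains i) := by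
  induction row generalizing ind0 c0 b0 with
  | nil => simp [List.count]
  | cons y ys ih =>
    simp only [List.foldl_cons]
    by_cases h : i = y
    · subst h
      rw [ih]
      simp
      ring
    · have h' : (i == y) = false := by simp [h]
      rw [if_neg (by simp [h]), ih]
      simp [Ne.symm h, h]

lemma sedeMayor_ge (row : List Int) (m0 : Int) :
    m0 ≤ row.foldl (fun mayor x => if x > mayor then x else mayor) m0
    ∧ ∀ x ∈ row, x ≤ row.foldl (fun mayor x => if x > mayor then x else mayor) m0 := by
  induction row generalizing m0 with
  | nil => simp
  | cons y ys ih =>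
    simp only [List.foldl_cons, List.mem_cons]
    constructor
    · split_ifs with h
      · exact le_trans (le_of_lt h) (ih _).1
      · exact (ih _).1
    · intro x hx
      rcases hx with rfl | hx
      · split_ifs with h
        · exact (ih _).1
        · exact le_trans (not_lt.mp h) (ih _).1
      · split_ifs with h <;> exact (ih _).2 x hx

lemma stepA_eq (row : List Int) (st : List Int × List Int × Int) (i : Int) :
    stepA row st i
    = if row.contains i then (st.1 ++ [i], st.2.1 ++ [(row.count i : Int)], i) else st := by
  unfold stepA
  rw [innerA]
  by_cases h : i ∈ row <;> simp [h]

-- A's outer loop appends (i, count) for each present i of the index list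
lemma outerA (row : List Int) (L : List Int) (vI vC : List Int) (ind : Int) :
    (L.foldl (stepA row) (vI, vC, ind)).1 = vI ++ (L.filter (fun i => row.contains i))
    ∧ (L.foldl (stepA row) (vI, vC, ind)).2.1
      = vC ++ (L.filter (fun i => row.contains i)).map (fun i => (row.count i : Int)) := by
  induction L generalizing vI vC ind with
  | nil => simp
  | cons i L ih =>
    rw [List.foldl_cons, stepA_eq, List.filter_cons]
    by_cases h : i ∈ row
    · have hc : row.contains i = true := by simpa using h
      simp only [hc, if_pos h, if_pos rfl]
      rw [(ih _ _ _).1, (ih _ _ _).2]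
      simp
    · have hc : row.contains i = false := by simpa using h
      simp only [hc, if_neg h, Bool.false_eq_true, if_neg (by simp : ¬ (false = true))]
      exact ⟨(ih _ _ _).1, (ih _ _ _).2⟩

-- B's grouped pass distributes over its accumulators
lemma groupLoop_shift_aux (n : ℕ) : ∀ (xs vI vC : List Int), xs.length ≤ n →
    groupLoop xs vI vC = (vI ++ (groupLoop xs [] []).1, vC ++ (groupLoop xs [] []).2) := by
  induction n with
  | zero =>
    intro xs vI vC h
    have hx : xs = [] := List.eq_nil_of_length_eq_zero (Nat.le_zero.mp h)
    subst hx
    simp [groupLoop]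
  | succ n ih =>
    intro xs vI vC h
    match xs with
    | [] => simp [groupLoop]
    | x :: rest =>
      simp only [groupLoop, List.nil_append]
      have hlen : (rest.dropWhile (fun y => y == x)).length ≤ n := by
        have := List.length_dropWhile_le (fun y => y == x) rest
        simp only [List.length_cons] at h
        omega
      rw [ih _ _ _ hlen, ih (rest.dropWhile (fun y => y == x)) [x]
        [1 + ((rest.takeWhile (fun y => y == x)).length : Int)] hlen]
      simp [List.append_assoc]

lemma groupLoop_shift (xs vI vC : List Int) :
    groupLoop xs vI vC = (vI ++ (groupLoop xs [] []).1, vC ++ (groupLoop xs [] []).2) :=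
  groupLoop_shift_aux xs.length xs vI vC le_rfl

-- after dropping the leading run of x from a sorted tail, everything is strictly larger
lemma dropWhile_gt (x : Int) : ∀ (rest : List Int), (∀ y ∈ rest, x ≤ y) → rest.Pairwise (· ≤ ·) →
    ∀ v ∈ rest.dropWhile (fun y => y == x), x < v := by
  intro rest
  induction rest with
  | nil => simp
  | cons y ys ih =>
    intro hx hp v hv
    rw [List.dropWhile_cons] at hv
    by_cases hyx : y = x
    · rw [if_pos (by simp [hyx])] at hv
      exact ih (fun z hz => hx z (List.mem_cons_of_mem _ hz)) (List.pairwise_cons.mp hp).2 v hv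
    · rw [if_neg (by simp [hyx])] at hv
      have hxy : x < y := lt_of_le_of_ne (hx y (List.mem_cons_self ..)) (Ne.symm hyx)
      rcases List.mem_cons.mp hv with rfl | hv
      · exact hxy
      · exact lt_of_lt_of_le hxy ((List.pairwise_cons.mp hp).1 v hv)

-- B's grouped pass, on a sorted list, yields its strictly increasing values with their counts
lemma groupLoop_spec_aux (n : ℕ) : ∀ (s : List Int), s.length ≤ n → s.Pairwise (· ≤ ·) →
    (groupLoop s [] []).1.Pairwise (· < ·)
    ∧ (∀ v, v ∈ (groupLoop s [] []).1 ↔ v ∈ s)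
    ∧ (groupLoop s [] []).2 = (groupLoop s [] []).1.map (fun v => (s.count v : Int)) := by
  induction n with
  | zero =>
    intro s h _
    have hx : s = [] := List.eq_nil_of_length_eq_zero (Nat.le_zero.mp h)
    subst hx
    simp [groupLoop]
  | succ n ih =>
    intro s h hs
    match s with
    | [] => simp [groupLoop]
    | x :: rest =>
      have hx : ∀ y ∈ rest, x ≤ y := (List.pairwise_cons.mp hs).1
      have hrest : rest.Pairwise (· ≤ ·) := (List.pairwise_cons.mp hs).2
      set same := rest.takeWhile (fun y => y == x) with hsamedef
      set restA := rest.dropWhile (fun y => y == x) with hrestAdef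
      have hsplit : same ++ restA = rest := List.takeWhile_append_dropWhile
      have hsame : ∀ y ∈ same, y = x := fun y hy => by
        simpa using List.mem_takeWhile_imp hy
      have hsubA : restA.Sublist rest := List.dropWhile_sublist _
      have hA : restA.Pairwise (· ≤ ·) := hrest.sublist hsubA
      have hgt : ∀ v ∈ restA, x < v := dropWhile_gt x rest hx hrest
      have hnA : x ∉ restA := fun hmem => absurd rfl (ne_of_gt (hgt x hmem))
      have hcx : (x :: rest).count x = 1 + same.length := by
        have h1 : same.count x = same.length :=
          List.count_eq_length.mpr (fun b hb => (hsame b hb).symm)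
        have h2 : restA.count x = 0 := List.count_eq_zero.mpr hnA
        rw [List.count_cons_self, ← hsplit, List.count_append, h1, h2]
        omega
      have hcv : ∀ v ∈ restA, (x :: rest).count v = restA.count v := by
        intro v hv
        have hvx : v ≠ x := ne_of_gt (hgt v hv)
        have h1 : same.count v = 0 :=
          List.count_eq_zero.mpr (fun hm => hvx (hsame v hm))
        rw [← hsplit]
        simp [List.count_append, h1, Ne.symm hvx]
      have hlen : restA.length ≤ n := by
        have := List.length_dropWhile_le (fun y => y == x) rest
        rw [← hrestAdef] at this
        simp only [List.length_cons] at h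
        omega
      obtain ⟨ihp, ihm, ihc⟩ := ih restA hlen hA
      have hstep : groupLoop (x :: rest) [] []
          = (x :: (groupLoop restA [] []).1, (1 + (same.length : Int)) :: (groupLoop restA [] []).2) := by
        simp only [groupLoop]
        rw [groupLoop_shift]
        simp
        exact ⟨rfl, rfl, rfl⟩
      refine ⟨?_, ?_, ?_⟩
      · rw [hstep]
        exact List.pairwise_cons.mpr ⟨fun v hv => hgt v ((ihm v).mp hv), ihp⟩
      · intro v
        rw [hstep]
        simp only [List.mem_cons, ihm]
        constructor
        · rintro (rfl | hv)
          · exact Or.inl rfl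
          · exact Or.inr (hsplit ▸ List.mem_append_right same hv)
        · rintro (rfl | hv)
          · exact Or.inl rfl
          · rw [← hsplit] at hv
            rcases List.mem_append.mp hv with hv | hv
            · exact Or.inl (hsame v hv)
            · exact Or.inr hv
      · rw [hstep]
        simp only [List.map_cons]
        congr 1
        · rw [hcx]; push_cast; ring
        · rw [ihc]
          exact List.map_congr_left (fun v hv => by
            rw [hcv v ((ihm v).mp hv)])

lemma groupLoop_spec (s : List Int) (hs : s.Pairwise (· ≤ ·)) :
    (groupLoop s [] []).1.Pairwise (· < ·)
    ∧ (∀ v, v ∈ (groupLoop s [] []).1 ↔ v ∈ s)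
    ∧ (groupLoop s [] []).2 = (groupLoop s [] []).1.map (fun v => (s.count v : Int)) :=
  groupLoop_spec_aux s.length s le_rfl hs


-- assembling: A's filtered 0..max scan and B's grouped sorted pass produce the same two lists
lemma main_eq (v : List (List Int)) : pacientesPorSede v = pacientesPorSede_alt v := by
  simp only [pacientesPorSede, pacientesPorSede_alt]
  set row := v.headD [] with hrow
  set L := PySem.List.pyRange 0 (sedeMayorPy v + 1) 1 with hL
  set m := row.filter (fun x => decide (0 ≤ x)) with hm
  set s := PySem.List.sorted m (fun x => x) false with hsdef
  set valsA := L.filter (fun i => row.contains i) with hvalsA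
  have hsorted : s.Pairwise (· ≤ ·) := PySem.List.sorted_pairwise m (fun x => x)
  obtain ⟨gp, gm, gc⟩ := groupLoop_spec s hsorted
  have hOA := outerA row L [] [] 0
  have hmemA : ∀ i : Int, i ∈ valsA ↔ i ∈ s := by
    intro i
    rw [hvalsA, List.mem_filter, hL, PySem.List.mem_pyRange_one,
      hsdef, PySem.List.mem_sorted, hm, List.mem_filter]
    constructor
    · rintro ⟨⟨h0, _⟩, hc⟩
      exact ⟨by simpa using hc, by simpa using h0⟩
    · rintro ⟨hr, h0'⟩
      have h0 : (0 : ℤ) ≤ i := by simpa using h0'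
      have hle : i ≤ sedeMayorPy v := by
        have := (sedeMayor_ge row 0).2 i hr
        simpa [sedeMayorPy, hrow] using this
      exact ⟨⟨h0, by omega⟩, by simpa using hr⟩
  have h1 : valsA.Pairwise (· < ·) := by
    rw [hvalsA, hL]
    exact (PySem.List.pairwise_lt_pyRange_one 0 (sedeMayorPy v + 1)).filter _
  have hnd1 : valsA.Nodup := h1.imp (fun h => ne_of_lt h)
  have hnd2 : (groupLoop s [] []).1.Nodup := gp.imp (fun h => ne_of_lt h)
  have hperm : valsA.Perm (groupLoop s [] []).1 :=
    (List.perm_ext_iff_of_nodup hnd1 hnd2).mpr (fun a => (hmemA a).trans (gm a).symm)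
  have hvals : valsA = (groupLoop s [] []).1 :=
    List.eq_of_perm_of_sorted (fun a b _ _ ha hb => absurd hb (lt_asymm ha)) h1 gp hperm
  have hcnt : valsA.map (fun i => (row.count i : Int)) = (groupLoop s [] []).2 := by
    rw [gc, ← hvals]
    refine List.map_congr_left (fun i hi => ?_)
    have h0 : (0 : ℤ) ≤ i := by
      have := (List.mem_filter.mp (hvalsA ▸ hi)).1
      rw [hL] at this
      exact (PySem.List.mem_pyRange_one.mp this).1
    have e1 : s.count i = m.count i := (PySem.List.sorted_perm m (fun x => x) false).count_eq i
    have e2 : m.count i = row.count i := by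
      rw [hm]
      exact List.count_filter (by simpa using h0)
    rw [e1, e2]
  rw [hOA.1, hOA.2]
  simp only [List.nil_append]
  rw [← hvalsA, hcnt, hvals]

-- ===== VERDICT (by name: the statement is the Claim_ definition above) =====
theorem pacientesPorSede_spec : Claim_equal_pacientesPorSede := by
  intro v _ _
  exact main_eq v
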